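-- pv_equiv track=rewrite | github.com/Piyushjain1857/Data-Structure | matrix/fast_transpose_of_matrix.py | fast_transpose
-- ===== SOURCE A (Python) =====
-- def fast_transpose(sparse):
--     rows, cols, count = sparse[0]
--     result = [[cols, rows, count]] + [[0, 0, 0] for _ in range(count)]
--
--     if count == 0:
--         return result
--
--     # Step 1: Count elements in each column
--     col_count = [0] * cols
--     for i in range(1, count + 1):
--         col = sparse[i][1]
--         col_count[col] += 1
--
--     # Step 2: Find starting position
--     start_pos = [0] * cols
--     start_pos[0] = 1
--     for i in range(1, cols):
--         start_pos[i] = start_pos[i-1] + col_count[i-1]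
--
--     # Step 3: Place elements
--     for i in range(1, count + 1):
--         r, c, v = sparse[i]
--         pos = start_pos[c]
--         result[pos] = [c, r, v]
--         start_pos[c] += 1
--
--     return result
-- ===== SOURCE B (Python) =====
-- def fast_transpose(sparse):
--     rows, cols, count = sparse[0]
--     result = [[cols, rows, count]]
--     for c in range(cols):
--         for i in range(1, count + 1):
--             r, col, v = sparse[i]
--             if col == c:
--                 result.append([c, r, v])
--     return result
-- ===== Notes on version B (the rewrite author's own statement) =====
-- stated objective: simpler
-- what changed: Replaces the counting-sort placement (per-column counts, prefix-sum start positions, indexed scatter into a zero-filled result) by the naive simple transpose: for each target column in order, scan the triplets and append the matching ones, so no col_count/start_pos tables and no index arithmetic are needed.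
-- outside the precondition, e.g. on fast_transpose([[2, 2, 1], [0, -1, 5]]): A returns [[2, 2, 1], [-1, 0, 5]], B returns [[2, 2, 1]]
import Mathlib
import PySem

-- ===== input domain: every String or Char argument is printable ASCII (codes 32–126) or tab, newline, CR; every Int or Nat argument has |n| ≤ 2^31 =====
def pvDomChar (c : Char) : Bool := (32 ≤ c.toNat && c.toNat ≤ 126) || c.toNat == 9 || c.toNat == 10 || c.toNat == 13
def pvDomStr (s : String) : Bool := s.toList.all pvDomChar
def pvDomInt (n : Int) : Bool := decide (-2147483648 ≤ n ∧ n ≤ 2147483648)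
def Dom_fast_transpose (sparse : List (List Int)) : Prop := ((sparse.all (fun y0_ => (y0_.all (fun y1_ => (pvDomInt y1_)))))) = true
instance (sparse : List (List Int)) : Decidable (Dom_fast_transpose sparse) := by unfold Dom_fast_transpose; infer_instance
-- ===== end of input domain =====

-- B replaces A's counting-sort placement (col_count / start_pos / indexed scatter) by the naive
-- simple transpose (per target column, scan triplets in order and append matches); simpler, not faster.

-- ===== PORT A =====
-- Literal port of A.  Python raises (IndexError/ValueError) where the list patterns below fail or
-- an index is out of range; those inputs are excluded by Pre_fast_transpose and the port returns a
-- default there (pyGetD/pySetD total forms).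
def fast_transpose (sparse : List (List Int)) : List (List Int) :=
  match sparse with
  | [] => []
  | h :: _ =>
    match h with
    | [rows, cols, count] =>
      -- result = [[cols, rows, count]] + [[0,0,0] for _ in range(count)]
      let result := [[cols, rows, count]] ++ List.replicate count.toNat ([0, 0, 0] : List Int)
      if count = 0 then result
      else
        -- Step 1: col_count
        let col_count := (PySem.List.pyRange 1 (count + 1) 1).foldl
          (fun cc i =>
            let col := PySem.List.pyGetD (PySem.List.pyGetD sparse i []) 1 0
            PySem.List.pySetD cc col (PySem.List.pyGetD cc col 0 + 1))
          (List.replicate cols.toNat (0 : Int))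
        -- Step 2: start_pos
        let sp0 := PySem.List.pySetD (List.replicate cols.toNat (0 : Int)) 0 1
        let start_pos := (PySem.List.pyRange 1 cols 1).foldl
          (fun sp i => PySem.List.pySetD sp i
            (PySem.List.pyGetD sp (i - 1) 0 + PySem.List.pyGetD col_count (i - 1) 0))
          sp0
        -- Step 3: place elements
        let fin := (PySem.List.pyRange 1 (count + 1) 1).foldl
          (fun (st : List (List Int) × List Int) i =>
            match PySem.List.pyGetD sparse i [] with
            | [r, c, v] =>
              let pos := PySem.List.pyGetD st.2 c 0
              (PySem.List.pySetD st.1 pos [c, r, v], PySem.List.pySetD st.2 c (pos + 1))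
            | _ => st)
          (result, start_pos)
        fin.1
    | _ => []

-- ===== PORT B =====
-- The unpackings 'rows, cols, count = sparse[0]' and 'r, col, v = sparse[i]' are ported by
-- positional access (headD/getD); exact on Pre_fast_transpose, where sparse[0] and every scanned
-- row have exactly 3 entries (outside Pre_ the Python raises).
def fast_transpose_alt (sparse : List (List Int)) : List (List Int) :=
  let h := sparse.headD []
  let rows := h.getD 0 0
  let cols := h.getD 1 0
  let count := h.getD 2 0
  (PySem.List.pyRange 0 cols 1).foldl
    (fun res c =>
      (PySem.List.pyRange 1 (count + 1) 1).foldl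
        (fun res2 i =>
          let row := PySem.List.pyGetD sparse i []
          if row.getD 1 0 == c then res2 ++ [[c, row.getD 0 0, row.getD 2 0]] else res2)
        res)
    [[cols, rows, count]]

-- ===== PRECONDITION & SPEC =====
-- Pre_ restricts to the natural domain of the triplet representation: a header row [rows, cols, count]
-- and, when count > 0, at least count triplet rows of exactly 3 entries whose column lies in [0, cols)
-- (count = 0 and count < 0 with cols > 0 are kept: A returns there, ignoring the tail).  Outside it A
-- variously raises IndexError/ValueError or, via Python's negative-index wraparound on a negative
-- column, returns a misplaced result that is an accident of its placement tables.
def Pre_fast_transpose (sparse : List (List Int)) : Prop :=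
  sparse ≠ [] ∧ (sparse.getD 0 []).length = 3 ∧
  (let h := sparse.getD 0 []
   let cols := h.getD 1 0
   let count := h.getD 2 0
   count = 0 ∨ (count < 0 ∧ 0 < cols) ∨
   (0 < count ∧ count ≤ (sparse.length : Int) - 1 ∧
    ∀ row ∈ (sparse.drop 1).take count.toNat,
      row.length = 3 ∧ 0 ≤ row.getD 1 0 ∧ row.getD 1 0 < cols))
instance (sparse : List (List Int)) : Decidable (Pre_fast_transpose sparse) := by
  unfold Pre_fast_transpose; infer_instance

def pvWitness_fast_transpose : List (List Int) := [[2, 3, 3], [0, 1, 7], [1, 0, 8], [1, 1, 9]]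

def Spec_fast_transpose (sparse : List (List Int)) (out : List (List Int)) : Prop := out = fast_transpose_alt sparse
instance (sparse : List (List Int)) (out : List (List Int)) : Decidable (Spec_fast_transpose sparse out) := by unfold Spec_fast_transpose; infer_instance

-- ===== CLAIM (what is proved, stated in full; the proofs are below) =====
def Claim_equal_fast_transpose : Prop := ∀ (sparse : List (List Int)), Dom_fast_transpose sparse → Pre_fast_transpose sparse → Spec_fast_transpose sparse (fast_transpose sparse)

-- ===== LEMMAS AND PROOFS =====

def pvFmt (row : List Int) : List Int := [row.getD 1 0, row.getD 0 0, row.getD 2 0]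
def pvWf (cols : Int) (M : List (List Int)) : Prop :=
  ∀ row ∈ M, row.length = 3 ∧ 0 ≤ row.getD 1 0 ∧ row.getD 1 0 < cols
def pvApply (R : List (List Int)) (ws : List (Int × List Int)) : List (List Int) :=
  ws.foldl (fun R pv => PySem.List.pySetD R pv.1 pv.2) R
def pvWrites : List (List Int) → (Int → Int) → List (Int × List Int)
  | [], _ => []
  | row :: M, base =>
    (base (row.getD 1 0), pvFmt row) ::
      pvWrites M (fun c' => if c' = row.getD 1 0 then base (row.getD 1 0) + 1 else base c')
def pvBucket (M : List (List Int)) (c : Int) : List (List Int) :=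
  (M.filter (fun row => row.getD 1 0 == c)).map pvFmt
def pvBase (M : List (List Int)) (c : Int) : Int :=
  1 + (M.countP (fun row => decide (row.getD 1 0 < c)) : Int)

-- L1: fold over range a..b indexing xs = fold over the slice
theorem pv_foldl_range_getD {α β : Type} (xs : List α) (d : α) (f : β → α → β) :
    ∀ (t : Nat) (a : Int) (init : β), 0 ≤ a → a + t ≤ xs.length →
    (PySem.List.pyRange a (a + t) 1).foldl (fun acc i => f acc (PySem.List.pyGetD xs i d)) init
      = ((xs.drop a.toNat).take t).foldl f init := by
  intro t
  induction t with
  | zero => intro a init h0 hb; simp [PySem.List.pyRange_one_eq_nil]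
  | succ n ih =>
    intro a init h0 hb
    rw [PySem.List.pyRange_one_cons (by omega)]
    have hlt : a.toNat < xs.length := by omega
    have hdrop : xs.drop a.toNat = xs[a.toNat] :: xs.drop (a.toNat + 1) :=
      List.drop_eq_getElem_cons hlt
    rw [hdrop]
    simp only [List.foldl_cons, List.take_succ_cons]
    rw [PySem.List.pyGetD_eq_getElem xs d h0 (by omega)]
    have : a + (n + 1 : Nat) = (a + 1) + n := by push_cast; ring
    rw [this, ih (a + 1) _ (by omega) (by omega)]
    congr 1
    rw [show (a+1).toNat = a.toNat + 1 by omega]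

-- row of length 3 is a literal triple
theorem pv_len3 (row : List Int) (h : row.length = 3) : ∃ r c v, row = [r, c, v] := by
  match row, h with
  | [a, b, c], _ => exact ⟨a, b, c, rfl⟩

-- pvWrites depends on base only at the columns of M
theorem pvWrites_congr (M : List (List Int)) :
    ∀ base base', (∀ row ∈ M, base (row.getD 1 0) = base' (row.getD 1 0)) →
    pvWrites M base = pvWrites M base' := by
  induction M with
  | nil => intro _ _ _; rfl
  | cons row M ih =>
    intro base base' h
    have h0 := h row (by simp)
    simp only [pvWrites, h0]
    congr 1
    apply ih
    intro row' hr'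
    simp only [List.getD] at *
    split_ifs with hc
    · rfl
    · exact h row' (by simp [hr'])

-- A's step-3 fold is pvApply of pvWrites
theorem pv_step3 (cols : Int) :
    ∀ (M : List (List Int)) (sp : List Int) (R : List (List Int)),
    pvWf cols M → sp.length = cols.toNat →
    (M.foldl
      (fun (st : List (List Int) × List Int) row =>
        match row with
        | [r, c, v] =>
          (PySem.List.pySetD st.1 (PySem.List.pyGetD st.2 c 0) [c, r, v],
            PySem.List.pySetD st.2 c (PySem.List.pyGetD st.2 c 0 + 1))
        | _ => st)
      (R, sp)).1
    = pvApply R (pvWrites M (fun c => PySem.List.pyGetD sp c 0)) := by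
  intro M
  induction M with
  | nil => intro sp R _ _; rfl
  | cons row M ih =>
    intro sp R hwf hlen
    obtain ⟨h3, hc0, hcc⟩ := hwf row (by simp)
    obtain ⟨r, c, v, rfl⟩ := pv_len3 row h3
    have hg : ([r, c, v] : List Int).getD 1 0 = c := rfl
    simp only [List.foldl_cons, pvWrites, hg]
    simp only [pvApply, List.foldl_cons]
    have hc0' : (0:Int) ≤ c := by simpa [hg] using hc0
    have hcc' : c < cols := by simpa [hg] using hcc
    rw [ih (PySem.List.pySetD sp c (PySem.List.pyGetD sp c 0 + 1)) _
      (fun r hr => hwf r (by simp [hr])) (by simp [hlen])]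
    simp only [pvApply]
    congr 1
    apply pvWrites_congr
    intro row' hr'
    obtain ⟨_, hd0', hdc'⟩ := hwf row' (by simp [hr'])
    have hcast : c = ((c.toNat : Nat) : Int) := by omega
    have hcast' : row'.getD 1 0 = (((row'.getD 1 0).toNat : Nat) : Int) := by omega
    rw [hcast, hcast', PySem.List.pyGetD_pySetD_natCast sp _ _ _ _ (by omega)]
    simp only [List.getD] at hd0' hdc' ⊢
    by_cases h : (row'[1]?.getD 0).toNat = c.toNat
    · rw [if_pos h, if_pos (by omega)]
    · rw [if_neg h, if_neg (by omega)]

-- counting split: col < c+1  =  col < c  plus  col = c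
theorem pv_countP_split (c : Int) : ∀ (M : List (List Int)),
    M.countP (fun row => decide (row.getD 1 0 < c + 1))
      = M.countP (fun row => decide (row.getD 1 0 < c)) + M.countP (fun row => row.getD 1 0 == c) := by
  intro M
  induction M with
  | nil => rfl
  | cons row M ih =>
    simp only [List.countP_cons, ih, decide_eq_true_eq, beq_iff_eq]
    split_ifs <;> omega

-- Step 1: the col_count fold counts occurrences of each column
theorem pv_colcount (cols : Int) : ∀ (M : List (List Int)) (cc : List Int),
    pvWf cols M → cc.length = cols.toNat →
    ((M.foldl (fun cc row =>
        PySem.List.pySetD cc (PySem.List.pyGetD row 1 0)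
          (PySem.List.pyGetD cc (PySem.List.pyGetD row 1 0) 0 + 1)) cc).length = cc.length
     ∧ ∀ k : Int, 0 ≤ k → k < cols →
        PySem.List.pyGetD (M.foldl (fun cc row =>
          PySem.List.pySetD cc (PySem.List.pyGetD row 1 0)
            (PySem.List.pyGetD cc (PySem.List.pyGetD row 1 0) 0 + 1)) cc) k 0
          = PySem.List.pyGetD cc k 0 + (M.countP (fun row => row.getD 1 0 == k) : Int)) := by
  intro M
  induction M with
  | nil => intro cc _ _; exact ⟨rfl, by intro k _ _; simp [List.countP]⟩
  | cons row M ih =>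
    intro cc hwf hlen
    obtain ⟨h3, hc0, hcc⟩ := hwf row (by simp)
    have hg : PySem.List.pyGetD row 1 0 = row.getD 1 0 := by
      simpa using PySem.List.pyGetD_ofNat' row 1 0
    simp only [List.foldl_cons, hg]
    set cc' := PySem.List.pySetD cc (row.getD 1 0) (PySem.List.pyGetD cc (row.getD 1 0) 0 + 1) with hcc'
    have hlen' : cc'.length = cols.toNat := by simp [hcc', hlen]
    obtain ⟨ihl, ihv⟩ := ih cc' (fun r hr => hwf r (by simp [hr])) hlen'
    refine ⟨by rw [ihl]; simp [hcc', hlen], ?_⟩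
    intro k hk0 hkc
    rw [ihv k hk0 hkc, List.countP_cons, hcc']
    rw [show row.getD 1 0 = (((row.getD 1 0).toNat : Nat) : Int) from by omega]
    rw [show k = ((k.toNat : Nat) : Int) from by omega]
    rw [PySem.List.pyGetD_pySetD_natCast cc _ _ _ _ (by omega)]
    by_cases h : k.toNat = (row.getD 1 0).toNat
    · rw [if_pos h, if_pos (by simp only [beq_iff_eq]; omega), h]
      push_cast
      omega
    · rw [if_neg h, if_neg (by simp only [beq_iff_eq]; omega)]
      push_cast
      omega

-- Step 2: the start_pos fold computes the prefix sums pSum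
theorem pv_startpos (cols : Int) (CC : List Int) (cnt pSum : Int → Int)
    (hCC : ∀ k : Int, 0 ≤ k → k < cols → PySem.List.pyGetD CC k 0 = cnt k)
    (hS0 : pSum 0 = 1)
    (hSstep : ∀ c : Int, 0 ≤ c → c < cols → pSum (c + 1) = pSum c + cnt c) :
    ∀ (t : Nat), (t : Int) < cols →
    ((PySem.List.pyRange 1 (1 + (t : Int)) 1).foldl
        (fun sp i => PySem.List.pySetD sp i
          (PySem.List.pyGetD sp (i - 1) 0 + PySem.List.pyGetD CC (i - 1) 0))
        (PySem.List.pySetD (List.replicate cols.toNat (0 : Int)) 0 1)).length = cols.toNat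
    ∧ ∀ c : Int, 0 ≤ c → c ≤ (t : Int) →
        PySem.List.pyGetD ((PySem.List.pyRange 1 (1 + (t : Int)) 1).foldl
          (fun sp i => PySem.List.pySetD sp i
            (PySem.List.pyGetD sp (i - 1) 0 + PySem.List.pyGetD CC (i - 1) 0))
          (PySem.List.pySetD (List.replicate cols.toNat (0 : Int)) 0 1)) c 0 = pSum c := by
  intro t
  induction t with
  | zero =>
    intro ht
    constructor
    · simp [PySem.List.pyRange_one_eq_nil]
    · intro c hc0 hct
      have hc : c = 0 := by omega
      subst hc
      rw [PySem.List.pyRange_one_eq_nil (by omega)]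
      simp only [List.foldl_nil]
      rw [show (0 : Int) = ((0 : Nat) : Int) from rfl,
        PySem.List.pyGetD_pySetD_natCast _ _ _ _ _ (by simp; omega)]
      simp [hS0]
  | succ t ih =>
    intro ht
    obtain ⟨ihl, ihv⟩ := ih (by omega)
    have hsplit : PySem.List.pyRange 1 (1 + ((t + 1 : Nat) : Int)) 1
        = PySem.List.pyRange 1 (1 + (t : Int)) 1 ++ [1 + (t : Int)] := by
      rw [show (1 + ((t + 1 : Nat) : Int)) = (1 + (t : Int)) + 1 from by push_cast; ring]
      exact PySem.List.pyRange_one_succ_right (by omega)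
    rw [hsplit, List.foldl_append]
    set SP := (PySem.List.pyRange 1 (1 + (t : Int)) 1).foldl
        (fun sp i => PySem.List.pySetD sp i
          (PySem.List.pyGetD sp (i - 1) 0 + PySem.List.pyGetD CC (i - 1) 0))
        (PySem.List.pySetD (List.replicate cols.toNat (0 : Int)) 0 1) with hSP
    simp only [List.foldl_cons, List.foldl_nil]
    have harith : 1 + (t : Int) - 1 = (t : Int) := by ring
    rw [harith]
    constructor
    · simp [ihl]
    · intro c hc0 hct
      have hvt : PySem.List.pyGetD SP (t : Int) 0 = pSum (t : Int) := ihv (t : Int) (by omega) (by omega)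
      rw [show (1 + (t : Int)) = (((t + 1 : Nat) : Nat) : Int) from by push_cast; ring]
      rw [show c = ((c.toNat : Nat) : Int) from by omega]
      rw [PySem.List.pyGetD_pySetD_natCast _ _ _ _ _ (by rw [ihl]; simp; omega)]
      by_cases h : c.toNat = t + 1
      · rw [if_pos h]
        rw [hvt, hCC (t : Int) (by omega) (by omega)]
        rw [show ((c.toNat : Nat) : Int) = (t : Int) + 1 from by omega]
        rw [hSstep (t : Int) (by omega) (by omega)]
      · rw [if_neg h]
        rw [show ((c.toNat : Nat) : Int) = c from by omega]
        exact ihv c hc0 (by omega)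

-- bucket of a cons
theorem pv_bucket_cons (r c v : Int) (M : List (List Int)) (c' : Int) :
    pvBucket ([r, c, v] :: M) c' = if c = c' then pvFmt [r, c, v] :: pvBucket M c' else pvBucket M c' := by
  simp only [pvBucket, List.filter_cons]
  by_cases h : c = c'
  · simp [h, List.getD]
  · simp [h, List.getD]

-- Step 3's writes are a permutation of the column-grouped enumerated buckets
theorem pv_writes_perm (cols : Int) : ∀ (M : List (List Int)) (base : Int → Int), pvWf cols M →
    (pvWrites M base).Perm
      ((PySem.List.pyRange 0 cols 1).flatMap
        (fun c => PySem.List.enumerate (pvBucket M c) (base c))) := by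
  intro M
  induction M with
  | nil =>
    intro base _
    simp [pvWrites, pvBucket, PySem.List.enumerate_nil]
  | cons row M ih =>
    intro base hwf
    obtain ⟨h3, hc0, hcc⟩ := hwf row (by simp)
    obtain ⟨r, c, v, rfl⟩ := pv_len3 row h3
    have hg : ([r, c, v] : List Int).getD 1 0 = c := rfl
    rw [hg] at hc0 hcc
    have hsplit : PySem.List.pyRange 0 cols 1
        = PySem.List.pyRange 0 c 1 ++ c :: PySem.List.pyRange (c + 1) cols 1 := by
      rw [PySem.List.pyRange_one_append 0 c cols (by omega) (by omega)]
      rw [PySem.List.pyRange_one_cons hcc]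
    rw [hsplit]
    simp only [List.flatMap_append, List.flatMap_cons]
    rw [pv_bucket_cons, if_pos rfl, PySem.List.enumerate_cons]
    have hX : ∀ cs : List Int, (∀ x ∈ cs, x ≠ c) →
        cs.flatMap (fun c' => PySem.List.enumerate (pvBucket ([r, c, v] :: M) c') (base c'))
        = cs.flatMap (fun c' => PySem.List.enumerate (pvBucket M c')
            ((fun c' => if c' = ([r, c, v] : List Int).getD 1 0 then base (([r, c, v] : List Int).getD 1 0) + 1 else base c') c')) := by
      intro cs hcs
      simp only [List.flatMap_def]
      apply congrArg
      apply List.map_congr_left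
      intro x hx
      rw [pv_bucket_cons, if_neg (fun hcx => hcs x hx hcx.symm), hg, if_neg (hcs x hx)]
    have hperm := ih (fun c' => if c' = ([r, c, v] : List Int).getD 1 0 then base (([r, c, v] : List Int).getD 1 0) + 1 else base c')
      (fun r' hr' => hwf r' (by simp [hr']))
    rw [hsplit] at hperm
    simp only [List.flatMap_append, List.flatMap_cons] at hperm
    rw [show pvWrites ([r, c, v] :: M) base
        = (base c, pvFmt [r, c, v]) ::
          pvWrites M (fun c' => if c' = ([r, c, v] : List Int).getD 1 0 then base (([r, c, v] : List Int).getD 1 0) + 1 else base c') from rfl]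
    rw [hX (PySem.List.pyRange 0 c 1) (fun x hx => by have := (PySem.List.mem_pyRange_one).1 hx; omega)]
    rw [hX (PySem.List.pyRange (c + 1) cols 1) (fun x hx => by have := (PySem.List.mem_pyRange_one).1 hx; omega)]
    refine List.Perm.trans (List.Perm.cons _ hperm) ?_
    simp only [hg]
    exact List.Perm.trans (List.perm_middle).symm (List.Perm.of_eq (by simp))

-- grouped enumerates with cumulative starts are one enumerate of the concatenation
theorem pv_flatmap_enum (bk : Int → List (List Int)) (base : Int → Int)
    (hcoh : ∀ c : Int, base (c + 1) = base c + (bk c).length) :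
    ∀ (t : Nat) (a : Int),
    (PySem.List.pyRange a (a + t) 1).flatMap (fun c => PySem.List.enumerate (bk c) (base c))
      = PySem.List.enumerate ((PySem.List.pyRange a (a + t) 1).flatMap bk) (base a) := by
  intro t
  induction t with
  | zero => intro a; simp [PySem.List.pyRange_one_eq_nil]
  | succ t ih =>
    intro a
    rw [PySem.List.pyRange_one_cons (by omega)]
    simp only [List.flatMap_cons]
    rw [show a + ((t + 1 : Nat) : Int) = (a + 1) + (t : Nat) from by push_cast; ring]
    rw [ih (a + 1), PySem.List.enumerate_append, hcoh a]
-- writes with distinct nonnegative positions can be applied in any order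
theorem pv_apply_perm : ∀ {ws ws' : List (Int × List Int)}, ws.Perm ws' →
    (∀ p ∈ ws, 0 ≤ p.1) → (ws.map Prod.fst).Nodup →
    ∀ R, pvApply R ws = pvApply R ws' := by
  intro ws ws' hperm
  induction hperm with
  | nil => intro _ _ _; rfl
  | cons x h ih =>
    intro hpos hnd R
    simp only [pvApply, List.foldl_cons]
    exact ih (fun p hp => hpos p (by simp [hp])) (by simp at hnd; exact hnd.2) _
  | swap x y l =>
    intro hpos hnd R
    simp only [pvApply, List.foldl_cons]
    have hxy : y.1 ≠ x.1 := by simp at hnd; exact hnd.1.1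
    have hx0 : 0 ≤ x.1 := hpos x (by simp)
    have hy0 : 0 ≤ y.1 := hpos y (by simp)
    rw [PySem.List.pySetD_of_nonneg _ _ hy0, PySem.List.pySetD_of_nonneg _ _ hx0,
        PySem.List.pySetD_of_nonneg _ _ hx0, PySem.List.pySetD_of_nonneg _ _ hy0,
        List.set_comm _ _ (by omega)]
  | trans h1 h2 ih1 ih2 =>
    intro hpos hnd R
    rw [ih1 hpos hnd R]
    exact ih2 (fun p hp => hpos p (h1.mem_iff.2 hp)) ((h1.map Prod.fst).nodup_iff.1 hnd) R

-- applying consecutively enumerated writes overwrites a segment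
theorem pv_apply_enum : ∀ (G R : List (List Int)) (s : Nat), s + G.length ≤ R.length →
    pvApply R (PySem.List.enumerate G (s : Int)) = R.take s ++ G ++ R.drop (s + G.length) := by
  intro G
  induction G with
  | nil => intro R s h; simp [pvApply, PySem.List.enumerate_nil]
  | cons g G ih =>
    intro R s h
    rw [PySem.List.enumerate_cons]
    simp only [pvApply, List.foldl_cons]
    rw [show ((s : Int) + 1) = ((s + 1 : Nat) : Int) from by push_cast; ring]
    have hs : s < R.length := by simp at h; omega
    have hset : PySem.List.pySetD R (s : Int) g = R.set s g := by simp
    rw [hset]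
    have hih := ih (R.set s g) (s + 1) (by simp only [List.length_set]; simp at h; omega)
    simp only [pvApply] at hih
    rw [hih]
    have h1 : (R.set s g).take (s + 1) = R.take s ++ [g] := by
      rw [List.take_set, List.set_eq_take_append_cons_drop,
        if_pos (by simp [List.length_take]; omega)]
      rw [List.take_take, List.drop_take]
      simp
    have h2 : (R.set s g).drop (s + 1 + G.length) = R.drop (s + 1 + G.length) := by
      rw [List.drop_set, if_pos (by omega)]
    rw [h1, h2, show s + (g :: G).length = s + 1 + G.length from by simp; omega]
    simp [List.append_assoc]

-- bucket length is the column count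
theorem pv_bucket_len (M : List (List Int)) (c : Int) :
    (pvBucket M c).length = M.countP (fun row => row.getD 1 0 == c) := by
  simp [pvBucket, List.countP_eq_length_filter]

-- pvBase is coherent with bucket lengths
theorem pv_base_coh (M : List (List Int)) (c : Int) :
    pvBase M (c + 1) = pvBase M c + ((pvBucket M c).length : Int) := by
  simp only [pvBase, pv_countP_split c M, pv_bucket_len]
  push_cast
  ring

-- pvBase starts at 1
theorem pv_base_zero (cols : Int) (M : List (List Int)) (hwf : pvWf cols M) : pvBase M 0 = 1 := by
  simp only [pvBase]
  rw [List.countP_eq_zero.2 (fun row hr => by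
    obtain ⟨_, h0, _⟩ := hwf row hr
    simp only [decide_eq_true_eq, List.getD]
    simp only [List.getD] at h0
    omega)]
  simp

-- one write per triplet
theorem pv_writes_len : ∀ (M : List (List Int)) (base : Int → Int),
    (pvWrites M base).length = M.length := by
  intro M
  induction M with
  | nil => intro _; rfl
  | cons row M ih => intro base; simp [pvWrites, ih]

-- all triplets land in some bucket: the buckets' total length is M.length
theorem pv_total (cols : Int) (hcols : 0 ≤ cols) (M : List (List Int)) (hwf : pvWf cols M) :
    ((PySem.List.pyRange 0 cols 1).flatMap (fun c => pvBucket M c)).length = M.length := by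
  have h1 := (pv_writes_perm cols M (pvBase M) hwf).length_eq
  rw [pv_writes_len] at h1
  have hrw : PySem.List.pyRange 0 cols 1 = PySem.List.pyRange 0 (0 + (cols.toNat : Int)) 1 := by
    congr 1
    omega
  rw [hrw] at h1 ⊢
  rw [pv_flatmap_enum (fun c => pvBucket M c) (pvBase M) (pv_base_coh M) cols.toNat 0] at h1
  rw [PySem.List.length_enumerate] at h1
  exact h1.symm

-- B's nested loops build the concatenation of the buckets
theorem pv_B_shape (cols : Int) (M : List (List Int)) (init : List (List Int)) :
    (PySem.List.pyRange 0 cols 1).foldl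
      (fun res c => M.foldl
        (fun res2 row =>
          if row.getD 1 0 == c then res2 ++ [[c, row.getD 0 0, row.getD 2 0]] else res2) res) init
    = init ++ (PySem.List.pyRange 0 cols 1).flatMap (fun c => pvBucket M c) := by
  have hinner : ∀ (c : Int) (res : List (List Int)),
      M.foldl (fun res2 row =>
        if row.getD 1 0 == c then res2 ++ [[c, row.getD 0 0, row.getD 2 0]] else res2) res
      = res ++ pvBucket M c := by
    intro c res
    rw [PySem.List.foldl_congr_mem' M
      (fun res2 row =>
        if row.getD 1 0 == c then res2 ++ [[c, row.getD 0 0, row.getD 2 0]] else res2)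
      (fun res2 row => if (row.getD 1 0 == c) then res2 ++ [pvFmt row] else res2)
      res ?_]
    · exact PySem.List.foldl_append_if _ _ M res
    · intro row hr res2
      simp only [List.getD, pvFmt]
      by_cases h : row[1]?.getD 0 = c
      · simp [h]
      · simp [h]
  rw [PySem.List.foldl_congr_mem (PySem.List.pyRange 0 cols 1)
    (fun res c => M.foldl
      (fun res2 row =>
        if row.getD 1 0 == c then res2 ++ [[c, row.getD 0 0, row.getD 2 0]] else res2) res)
    (fun res c => res ++ pvBucket M c) init (fun acc x _ => hinner x acc)]
  exact PySem.List.foldl_append_eq_flatMap _ _ init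

-- bridging corollary with an arbitrary upper bound
theorem pv_foldl_range_getD' {α β : Type} (xs : List α) (d : α) (f : β → α → β)
    (a b : Int) (init : β) (h0 : 0 ≤ a) (hab : a ≤ b) (hb : b ≤ xs.length) :
    (PySem.List.pyRange a b 1).foldl (fun acc i => f acc (PySem.List.pyGetD xs i d)) init
      = ((xs.drop a.toNat).take (b - a).toNat).foldl f init := by
  have h := pv_foldl_range_getD xs d f (b - a).toNat a init h0 (by omega)
  rw [show a + (((b - a).toNat : Nat) : Int) = b from by omega] at h
  exact h

-- start_pos over the full range 1..cols
theorem pv_startpos' (cols : Int) (hcols : 0 < cols) (CC : List Int) (cnt pSum : Int → Int)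
    (hCC : ∀ k : Int, 0 ≤ k → k < cols → PySem.List.pyGetD CC k 0 = cnt k)
    (hS0 : pSum 0 = 1)
    (hSstep : ∀ c : Int, 0 ≤ c → c < cols → pSum (c + 1) = pSum c + cnt c) :
    ((PySem.List.pyRange 1 cols 1).foldl
        (fun sp i => PySem.List.pySetD sp i
          (PySem.List.pyGetD sp (i - 1) 0 + PySem.List.pyGetD CC (i - 1) 0))
        (PySem.List.pySetD (List.replicate cols.toNat (0 : Int)) 0 1)).length = cols.toNat
    ∧ ∀ c : Int, 0 ≤ c → c < cols →
        PySem.List.pyGetD ((PySem.List.pyRange 1 cols 1).foldl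
          (fun sp i => PySem.List.pySetD sp i
            (PySem.List.pyGetD sp (i - 1) 0 + PySem.List.pyGetD CC (i - 1) 0))
          (PySem.List.pySetD (List.replicate cols.toNat (0 : Int)) 0 1)) c 0 = pSum c := by
  have h := pv_startpos cols CC cnt pSum hCC hS0 hSstep (cols - 1).toNat (by omega)
  rw [show 1 + (((cols - 1).toNat : Nat) : Int) = cols from by omega] at h
  exact ⟨h.1, fun c hc0 hcc => h.2 c hc0 (by omega)⟩

-- consecutive writes starting at 1
theorem pv_apply_enum_one (G R : List (List Int)) (h : 1 + G.length ≤ R.length) :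
    pvApply R (PySem.List.enumerate G 1) = R.take 1 ++ G ++ R.drop (1 + G.length) := by
  have h1 := pv_apply_enum G R 1 h
  norm_num at h1 ⊢
  exact h1

theorem pv_main (rows cols count : Int) (t : List (List Int))
    (hc : 0 < count) (hlen : count ≤ (t.length : Int))
    (hwf : pvWf cols (t.take count.toNat)) :
    fast_transpose ([rows, cols, count] :: t) = fast_transpose_alt ([rows, cols, count] :: t) := by
  have hMlen : (t.take count.toNat).length = count.toNat := by simp; omega
  have hM0 : t.take count.toNat ≠ [] := by
    intro h; rw [h] at hMlen; simp at hMlen; omega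
  obtain ⟨row0, hrow0⟩ := List.exists_mem_of_ne_nil _ hM0
  have hcols : 0 < cols := by have := hwf row0 hrow0; omega
  simp only [fast_transpose, fast_transpose_alt, List.headD_cons, List.getD_cons_zero, List.getD_cons_succ]
  rw [if_neg (by omega : ¬ count = 0)]
  -- bridge the three index loops over sparse into loops over the triplet list M
  rw [pv_foldl_range_getD' ([rows, cols, count] :: t) []
    (fun cc row => PySem.List.pySetD cc (PySem.List.pyGetD row 1 0)
      (PySem.List.pyGetD cc (PySem.List.pyGetD row 1 0) 0 + 1))
    1 (count + 1) (List.replicate cols.toNat 0) (by omega) (by omega) (by simp; omega)]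
  rw [pv_foldl_range_getD' ([rows, cols, count] :: t) []
    (fun (st : List (List Int) × List Int) row =>
      match row with
      | [r, c, v] =>
        (PySem.List.pySetD st.1 (PySem.List.pyGetD st.2 c 0) [c, r, v],
          PySem.List.pySetD st.2 c (PySem.List.pyGetD st.2 c 0 + 1))
      | _ => st)
    1 (count + 1) _ (by omega) (by omega) (by simp; omega)]
  rw [PySem.List.foldl_congr_mem (PySem.List.pyRange 0 cols 1)
    (fun res c => (PySem.List.pyRange 1 (count + 1) 1).foldl
      (fun res2 i =>
        if (PySem.List.pyGetD ([rows, cols, count] :: t) i []).getD 1 0 == c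
        then res2 ++ [[c, (PySem.List.pyGetD ([rows, cols, count] :: t) i []).getD 0 0,
          (PySem.List.pyGetD ([rows, cols, count] :: t) i []).getD 2 0]] else res2) res)
    (fun res c => ((([rows, cols, count] :: t).drop (1 : Int).toNat).take ((count + 1 - 1)).toNat).foldl
      (fun res2 row =>
        if row.getD 1 0 == c then res2 ++ [[c, row.getD 0 0, row.getD 2 0]] else res2) res)
    [[cols, rows, count]]
    (fun acc x _ => pv_foldl_range_getD' ([rows, cols, count] :: t) []
      (fun res2 row =>
        if row.getD 1 0 == x then res2 ++ [[x, row.getD 0 0, row.getD 2 0]] else res2)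
      1 (count + 1) acc (by omega) (by omega) (by simp; omega))]
  simp only [Int.toNat_one, List.drop_succ_cons, List.drop_zero,
    show (count + 1 - 1 : Int) = count from by ring]
  set M := List.take count.toNat t with hMdef
  set CC := M.foldl (fun cc row => PySem.List.pySetD cc (PySem.List.pyGetD row 1 0)
    (PySem.List.pyGetD cc (PySem.List.pyGetD row 1 0) 0 + 1)) (List.replicate cols.toNat (0 : Int)) with hCCdef
  obtain ⟨hCCl, hCCv⟩ := pv_colcount cols M (List.replicate cols.toNat (0 : Int)) hwf (by simp)
  have hcnt : ∀ k : Int, 0 ≤ k → k < cols →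
      PySem.List.pyGetD CC k 0 = (M.countP (fun row => row.getD 1 0 == k) : Int) := by
    intro k h0 h1
    rw [hCCdef, hCCv k h0 h1]
    rw [show PySem.List.pyGetD (List.replicate cols.toNat (0:Int)) k 0 = 0 from by
      rw [PySem.List.pyGetD_eq_getElem _ _ h0 (by simp; omega)]; simp]
    omega
  obtain ⟨hSPl, hSPv⟩ := pv_startpos' cols hcols CC
    (fun k => (M.countP (fun row => row.getD 1 0 == k) : Int)) (pvBase M) hcnt
    (pv_base_zero cols M hwf)
    (fun c h0 h1 => by rw [pv_base_coh M c, pv_bucket_len])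
  rw [pv_step3 cols M _ ([[cols, rows, count]] ++ List.replicate count.toNat [0, 0, 0]) hwf hSPl]
  rw [pvWrites_congr M (fun c => PySem.List.pyGetD ((PySem.List.pyRange 1 cols 1).foldl
        (fun sp i => PySem.List.pySetD sp i
          (PySem.List.pyGetD sp (i - 1) 0 + PySem.List.pyGetD CC (i - 1) 0))
        (PySem.List.pySetD (List.replicate cols.toNat (0 : Int)) 0 1)) c 0) (pvBase M)
    (fun row hr => by
      obtain ⟨_, h0, h1⟩ := hwf row hr
      exact hSPv _ h0 h1)]
  have hflat : (PySem.List.pyRange 0 cols 1).flatMap (fun c => PySem.List.enumerate (pvBucket M c) (pvBase M c))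
      = PySem.List.enumerate ((PySem.List.pyRange 0 cols 1).flatMap (fun c => pvBucket M c)) 1 := by
    have h := pv_flatmap_enum (fun c => pvBucket M c) (pvBase M) (pv_base_coh M) cols.toNat 0
    rw [show ((0 : Int) + (cols.toNat : Int)) = cols from by omega] at h
    rw [pv_base_zero cols M hwf] at h
    exact h
  have hG : ((PySem.List.pyRange 0 cols 1).flatMap (fun c => pvBucket M c)).length = count.toNat := by
    rw [pv_total cols (by omega) M hwf, hMlen]
  have hperm : (pvWrites M (pvBase M)).Perm
      (PySem.List.enumerate ((PySem.List.pyRange 0 cols 1).flatMap (fun c => pvBucket M c)) 1) := by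
    have h := pv_writes_perm cols M (pvBase M) hwf
    rw [hflat] at h
    exact h
  rw [← pv_apply_perm hperm.symm
      (fun p hp => by
        have h1 : p.1 ∈ (PySem.List.enumerate ((PySem.List.pyRange 0 cols 1).flatMap (fun c => pvBucket M c)) 1).map Prod.fst :=
          List.mem_map_of_mem hp
        rw [PySem.List.map_fst_enumerate] at h1
        have h2 := PySem.List.mem_pyRange_one.1 h1
        omega)
      (by rw [PySem.List.map_fst_enumerate]; exact PySem.List.nodup_pyRange_one _ _)
      ([[cols, rows, count]] ++ List.replicate count.toNat [0, 0, 0])]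
  rw [pv_apply_enum_one _ _ (by simp [hG]; omega)]
  rw [pv_B_shape cols M [[cols, rows, count]]]
  simp [hG]

theorem fast_transpose_spec : Claim_equal_fast_transpose := by
  intro sparse _ hpre
  unfold Spec_fast_transpose
  obtain ⟨hne, hlen3, hdisj⟩ := hpre
  match sparse, hne, hlen3, hdisj with
  | h :: t, _, hlen3, hdisj =>
    have hlen3' : h.length = 3 := by simpa [List.getD] using hlen3
    obtain ⟨rows, cols, count, rfl⟩ := pv_len3 h hlen3'
    simp only [List.getD] at hdisj
    rcases hdisj with hz | ⟨hneg, hcols⟩ | ⟨hpos, hle, hwf⟩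
    · -- count = 0
      have hz' : count = 0 := by simpa [List.getD] using hz
      subst hz'
      simp only [fast_transpose, fast_transpose_alt, List.headD_cons, List.getD_cons_zero, List.getD_cons_succ]
      rw [if_pos trivial]
      rw [PySem.List.foldl_congr_mem (PySem.List.pyRange 0 cols 1) _
        (fun (res : List (List Int)) _ => res) [[cols, rows, 0]]
        (fun acc x _ => by rw [PySem.List.pyRange_one_eq_nil (by omega)]; rfl)]
      rw [PySem.List.foldl_ignore]
      simp
    · -- count < 0, 0 < cols
      have hneg' : count < 0 := by simpa [List.getD] using hneg
      simp only [fast_transpose, fast_transpose_alt, List.headD_cons, List.getD_cons_zero, List.getD_cons_succ]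
      rw [if_neg (by omega)]
      rw [PySem.List.pyRange_one_eq_nil (show count + 1 ≤ 1 from by omega)]
      simp only [List.foldl_nil]
      rw [PySem.List.foldl_congr_mem (PySem.List.pyRange 0 cols 1) _
        (fun (res : List (List Int)) _ => res) [[cols, rows, count]]
        (fun acc x _ => rfl)]
      rw [PySem.List.foldl_ignore]
      simp [show count.toNat = 0 from by omega]
    · -- the real case
      have hpos' : 0 < count := by simpa [List.getD] using hpos
      have hwf' : pvWf cols (t.take count.toNat) := by
        intro row hr
        obtain ⟨a, b, c⟩ := hwf row hr
        exact ⟨a, b, c⟩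
      exact pv_main rows cols count t hpos' (by simp at hle; omega) hwf'
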